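-- pv_equiv track=rewrite | github.com/luchoss10/Algoritmos_Ordenamiento_Busquea | Ord_Shell.py | SecuenciaShell
-- ===== SOURCE A (Python) =====
-- def SecuenciaShell(n):
--     h = 1
--     upShell = []; secShell = []
--     while h < n:
--         upShell.append(h)
--         h = 3*h+1
--     for i in range(len(upShell)-1, -1, -1):
--         secShell.append(upShell[i]-1//3)
--     return secShell
-- ===== SOURCE B (Python) =====
-- def SecuenciaShell(n):
--     if n <= 1:
--         return []
--     h = 1
--     while 3 * h + 1 < n:
--         h = 3 * h + 1
--     res = []
--     while h >= 1:
--         res.append(h)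
--         h = (h - 1) // 3
--     return res
-- ===== Notes on version B (the rewrite author's own statement) =====
-- stated objective: alternative
-- what changed: Instead of appending gaps to an ascending list and then emitting it index-by-index in reverse, B climbs once to the largest gap below n and emits the descending sequence directly by walking the inverse recurrence, building no intermediate list.
import Mathlib
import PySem

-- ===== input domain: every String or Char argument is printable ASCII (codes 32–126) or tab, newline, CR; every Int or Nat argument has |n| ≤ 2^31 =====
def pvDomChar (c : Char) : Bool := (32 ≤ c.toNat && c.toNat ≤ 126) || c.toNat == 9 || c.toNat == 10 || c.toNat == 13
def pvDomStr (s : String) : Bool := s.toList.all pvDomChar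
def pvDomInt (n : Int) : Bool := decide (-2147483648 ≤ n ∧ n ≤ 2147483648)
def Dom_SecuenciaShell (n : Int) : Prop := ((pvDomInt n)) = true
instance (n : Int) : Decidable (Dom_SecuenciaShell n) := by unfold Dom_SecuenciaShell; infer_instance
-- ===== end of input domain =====

-- B climbs once to the largest gap below n and emits the descending sequence via the
-- inverse recurrence (h-1)//3 instead of building an ascending list and reversing it.


-- ===== PORT A =====
-- A's while-loop 'while h < n: upShell.append(h); h = 3*h+1' starting from h = 1;
-- h stays a positive integer throughout, so a Nat-valued loop variable is exact.
def pvBuildUp (h : Nat) (n : Int) : List Int :=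
  if (h : Int) < n then (h : Int) :: pvBuildUp (3 * h + 1) n else []
  termination_by (n - (h : Int)).toNat
  decreasing_by omega

def SecuenciaShell (n : Int) : List Int :=
  let upShell := pvBuildUp 1 n
  -- for i in range(len(upShell)-1, -1, -1): secShell.append(upShell[i] - 1//3)
  -- every i is a valid index, so pyGetD's default is never used
  (PySem.List.pyRange ((upShell.length : Int) - 1) (-1) (-1)).foldl
    (fun acc i => acc ++ [PySem.List.pyGetD upShell i 0 - PySem.Int.floordiv 1 3]) []

-- ===== PORT B =====
-- 'while 3*h+1 < n: h = 3*h+1' from h = 1 (h stays a positive integer)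
def pvClimb (h : Nat) (n : Int) : Nat :=
  if 3 * (h : Int) + 1 < n then pvClimb (3 * h + 1) n else h
  termination_by (n - (h : Int)).toNat
  decreasing_by omega

-- 'while h >= 1: res.append(h); h = (h-1)//3'; h ≥ 0 so Python's // is Nat division
def pvDown (h : Nat) : List Int :=
  if 1 ≤ h then (h : Int) :: pvDown ((h - 1) / 3) else []
  termination_by h
  decreasing_by omega

def SecuenciaShell_alt (n : Int) : List Int :=
  if n ≤ 1 then [] else pvDown (pvClimb 1 n)

-- ===== PRECONDITION & SPEC =====
def Spec_SecuenciaShell (n : Int) (out : List Int) : Prop := out = SecuenciaShell_alt n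
instance (n : Int) (out : List Int) : Decidable (Spec_SecuenciaShell n out) := by unfold Spec_SecuenciaShell; infer_instance

-- ===== CLAIM (what is proved, stated in full; the proofs are below) =====
def Claim_equal_SecuenciaShell : Prop := ∀ (n : Int), Dom_SecuenciaShell n → Spec_SecuenciaShell n (SecuenciaShell n)

-- ===== LEMMAS AND PROOFS =====

theorem foldl_append_singleton {α β : Type} (f : α → β) :
    ∀ (l : List α) (acc : List β),
      l.foldl (fun acc i => acc ++ [f i]) acc = acc ++ l.map f := by
  intro l
  induction l with
  | nil => simp
  | cons x xs ih => intro acc; simp [List.foldl, ih]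

-- A's reversed index loop produces upShell.reverse (since 1//3 = 0)
theorem secShell_eq_reverse (xs : List Int) :
    (PySem.List.pyRange ((xs.length : Int) - 1) (-1) (-1)).foldl
      (fun acc i => acc ++ [PySem.List.pyGetD xs i 0 - PySem.Int.floordiv 1 3]) []
    = xs.reverse := by
  rw [PySem.List.pyRange_neg_one_eq_reverse]
  have : ((xs.length : Int) - 1) + 1 = (xs.length : Int) := by ring
  rw [this]
  rw [foldl_append_singleton (fun i => PySem.List.pyGetD xs i 0 - PySem.Int.floordiv 1 3)]
  rw [List.map_reverse]
  have h0 : PySem.Int.floordiv 1 3 = 0 := by decide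
  simp only [h0, sub_zero]
  rw [show ((-1 : Int) + 1) = 0 from by ring]
  rw [PySem.List.map_pyGetD_pyRange_zero']
  simp

-- key invariant: reversing the ascending chain from h and continuing the descent
-- below h equals the full descent from the top gap
theorem buildUp_reverse_down (h : Nat) (n : Int) (h1 : 1 ≤ h) (hlt : (h : Int) < n) :
    (pvBuildUp h n).reverse ++ pvDown ((h - 1) / 3) = pvDown (pvClimb h n) := by
  induction h using pvBuildUp.induct (n := n) with
  | case1 h hcond ih =>
    by_cases hstep : 3 * (h : Int) + 1 < n
    · rw [pvBuildUp]
      simp only [if_pos hcond]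
      rw [pvClimb]
      simp only [if_pos hstep]
      have hrec := ih (by omega) (by push_cast; omega)
      rw [← hrec]
      have hd : (3 * h + 1 - 1) / 3 = h := by omega
      rw [hd]
      rw [show pvDown h = (h : Int) :: pvDown ((h - 1) / 3) from by rw [pvDown]; simp [if_pos h1]]
      simp
    · rw [pvBuildUp]
      simp only [if_pos hcond]
      rw [pvBuildUp]
      simp only [if_neg (show ¬ ((((3 * h + 1 : Nat)) : Int) < n) from by push_cast; omega)]
      rw [pvClimb]
      simp only [if_neg hstep]
      rw [show pvDown h = (h : Int) :: pvDown ((h - 1) / 3) from by rw [pvDown]; simp [if_pos h1]]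
      simp
  | case2 h hcond =>
    exact absurd hlt hcond

-- ===== VERDICT (by name: the statement is the Claim_ definition above) =====
theorem SecuenciaShell_spec : Claim_equal_SecuenciaShell := by
  intro n _
  unfold Spec_SecuenciaShell SecuenciaShell SecuenciaShell_alt
  simp only []
  rw [secShell_eq_reverse]
  by_cases hle : n ≤ 1
  · rw [if_pos hle]
    rw [pvBuildUp]
    simp only [if_neg (show ¬ ((1 : Nat) : Int) < n from by push_cast; omega)]
    simp
  · rw [if_neg hle]
    have := buildUp_reverse_down 1 n (le_refl 1) (by push_cast; omega)
    rw [show pvDown ((1 - 1 : Nat) / 3) = [] from by rw [pvDown]; simp] at this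
    simpa using this
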